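-- pv_equiv track=rewrite | github.com/Yukinolyr/hiraeth_fanmade | scripts/create_renamed_song_copy.py | renamed_filename
-- ===== SOURCE A (Python) =====
-- def renamed_filename(name: str, old_basename: str, new_basename: str) -> str:
--     if name == f"{old_basename}.xwb":
--         return f"{new_basename}.xwb"
--     if name == f"{old_basename}.xsb":
--         return f"{new_basename}.xsb"
--     if name == f"{old_basename}_pre.xwb":
--         return f"{new_basename}_pre.xwb"
--     if name == f"{old_basename}_pre.xsb":
--         return f"{new_basename}_pre.xsb"
--     for suffix in ("_00normal.xml", "_01hard.xml", "_02extreme.xml", "_03real.xml"):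
--         if name == f"{old_basename}{suffix}":
--             return f"{new_basename}{suffix}"
--     return name
-- ===== SOURCE B (Python) =====
-- _XML_TAGS = ('_00normal', '_01hard', '_02extreme', '_03real')
--
--
-- def renamed_filename(name: str, old_basename: str, new_basename: str) -> str:
--     # Parse from the right: split off the extension, dispatch on it, then
--     # examine the stem -- instead of enumerating eight candidate filenames.
--     stem, dot, ext = name.rpartition('.')
--     if not dot:
--         return name
--     if ext == 'xwb' or ext == 'xsb':
--         if stem == old_basename:
--             return f"{new_basename}.{ext}"
--         if stem == f"{old_basename}_pre":
--             return f"{new_basename}_pre.{ext}"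
--     elif ext == 'xml':
--         tag = stem[len(old_basename):]
--         if stem.startswith(old_basename) and tag in _XML_TAGS:
--             return f"{new_basename}{tag}.xml"
--     return name
-- ===== Notes on version B (the rewrite author's own statement) =====
-- stated objective: alternative
-- what changed: B parses the filename from the right with rpartition: it splits off the extension, dispatches on it (xwb/xsb vs xml), and then examines the stem (equality with old_basename or old_basename+'_pre', or a sliced tag in a tuple), instead of A's chain of eight full-candidate-string equality tests.
import Mathlib
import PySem

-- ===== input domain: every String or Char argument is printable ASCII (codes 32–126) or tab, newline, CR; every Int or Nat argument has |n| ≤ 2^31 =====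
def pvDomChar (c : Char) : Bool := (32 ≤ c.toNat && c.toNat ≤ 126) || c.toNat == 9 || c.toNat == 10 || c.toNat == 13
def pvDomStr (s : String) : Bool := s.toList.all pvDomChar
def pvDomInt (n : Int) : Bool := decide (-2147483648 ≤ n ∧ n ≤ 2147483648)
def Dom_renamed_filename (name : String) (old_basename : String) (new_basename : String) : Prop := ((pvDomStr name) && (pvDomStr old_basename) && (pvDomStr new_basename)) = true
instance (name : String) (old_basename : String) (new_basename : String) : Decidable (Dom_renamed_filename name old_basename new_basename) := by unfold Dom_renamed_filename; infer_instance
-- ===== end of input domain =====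

-- B parses the filename from the right (rpartition on the last '.'), dispatches on the
-- extension and then examines the stem, instead of A's eight candidate-string equality
-- tests (objective: alternative).

-- ===== PORT A =====
-- the 'for suffix in (...)' loop of A, step for step
def renamedLoop (n o nb : List Char) (name : String) : List (List Char) → String
  | [] => name
  | s :: rest => if n = o ++ s then String.ofList (nb ++ s) else renamedLoop n o nb name rest

-- f"{x}{y}" is ported as list append on code points (exact for string concatenation)
def renamed_filename (name : String) (old_basename : String) (new_basename : String) : String :=
  let n := name.toList
  let o := old_basename.toList
  let nb := new_basename.toList
  if n = o ++ ".xwb".toList then String.ofList (nb ++ ".xwb".toList)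
  else if n = o ++ ".xsb".toList then String.ofList (nb ++ ".xsb".toList)
  else if n = o ++ "_pre.xwb".toList then String.ofList (nb ++ "_pre.xwb".toList)
  else if n = o ++ "_pre.xsb".toList then String.ofList (nb ++ "_pre.xsb".toList)
  else renamedLoop n o nb name
    ["_00normal.xml".toList, "_01hard.xml".toList, "_02extreme.xml".toList, "_03real.xml".toList]

-- ===== PORT B =====
-- hand port of str.rpartition('.') (PySem has no rpartition): exact for a single-char
-- separator — returns (before last '.', ['.'], after last '.'), or ([],[],l) if no '.'
def rpart : List Char → List Char × List Char × List Char
  | [] => ([], [], [])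
  | c :: rest =>
    let (s, d, e) := rpart rest
    if d = [] then (if c = '.' then ([], ['.'], rest) else ([], [], c :: rest))
    else (c :: s, d, e)

-- stem[len(old):] with a non-negative in-range-or-beyond start is List.drop (exact);
-- stem.startswith(old) → PySem.Chars.startswith; 'tag in tuple' → List.contains
def renamed_filename_alt (name : String) (old_basename : String) (new_basename : String) : String :=
  let (stem, dot, ext) := rpart name.toList
  let o := old_basename.toList
  let nb := new_basename.toList
  if dot = [] then name
  else if ext = "xwb".toList ∨ ext = "xsb".toList then
    if stem = o then String.ofList (nb ++ '.' :: ext)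
    else if stem = o ++ "_pre".toList then String.ofList (nb ++ "_pre.".toList ++ ext)
    else name
  else if ext = "xml".toList then
    let tag := stem.drop o.length
    if PySem.Chars.startswith stem o &&
        ["_00normal".toList, "_01hard".toList, "_02extreme".toList, "_03real".toList].contains tag then
      String.ofList (nb ++ tag ++ ".xml".toList)
    else name
  else name

-- ===== PRECONDITION & SPEC =====
def Spec_renamed_filename (name : String) (old_basename : String) (new_basename : String) (out : String) : Prop := out = renamed_filename_alt name old_basename new_basename
instance (name : String) (old_basename : String) (new_basename : String) (out : String) : Decidable (Spec_renamed_filename name old_basename new_basename out) := by unfold Spec_renamed_filename; infer_instance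

-- ===== CLAIM (what is proved, stated in full; the proofs are below) =====
def Claim_equal_renamed_filename : Prop := ∀ (name : String) (old_basename : String) (new_basename : String), Dom_renamed_filename name old_basename new_basename → Spec_renamed_filename name old_basename new_basename (renamed_filename name old_basename new_basename)

-- ===== LEMMAS AND PROOFS =====

-- rpart characterization: either no dot anywhere, or the unique last-dot split
theorem rpart_spec (l : List Char) :
    (rpart l = ([], [], l) ∧ '.' ∉ l) ∨
    (∃ s e, rpart l = (s, ['.'], e) ∧ l = s ++ '.' :: e ∧ '.' ∉ e) := by
  induction l with
  | nil => left; exact ⟨rfl, by simp⟩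
  | cons c rest ih =>
    rcases ih with ⟨h, hm⟩ | ⟨s, e, h, he, hm⟩
    · by_cases hc : c = '.'
      · right; exact ⟨[], rest, by simp [rpart, h, hc], by simp [hc], hm⟩
      · left; constructor
        · simp [rpart, h, hc]
        · intro hcon
          rcases List.mem_cons.mp hcon with h' | h'
          · exact hc h'.symm
          · exact hm h'
    · right; exact ⟨c :: s, e, by simp [rpart, h], by simp [he], hm⟩

-- uniqueness of the last-dot decomposition
theorem takeWhile_ne_append (a b : List Char) (ha : ∀ x ∈ a, x ≠ '.') :
    (a ++ '.' :: b).takeWhile (· ≠ '.') = a := by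
  induction a with
  | nil => simp
  | cons x xs ih =>
    have hx : x ≠ '.' := ha x (by simp)
    have ih' := ih (fun y hy => ha y (by simp [hy]))
    simpa [hx] using ih'

theorem dot_split_unique {s e s' e' : List Char}
    (h : s ++ '.' :: e = s' ++ '.' :: e') (he : '.' ∉ e) (he' : '.' ∉ e') :
    s = s' ∧ e = e' := by
  have hr : e.reverse ++ '.' :: s.reverse = e'.reverse ++ '.' :: s'.reverse := by
    have := congrArg List.reverse h
    simpa using this
  have ht : e.reverse = e'.reverse := by
    have h1 := takeWhile_ne_append e.reverse s.reverse (by intro x hx; simp at hx; intro hh; exact he (hh ▸ hx))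
    have h2 := takeWhile_ne_append e'.reverse s'.reverse (by intro x hx; simp at hx; intro hh; exact he' (hh ▸ hx))
    rw [← h1, ← h2, hr]
  have hee : e = e' := by simpa using congrArg List.reverse ht
  subst hee
  exact ⟨List.append_inj_left' h rfl, rfl⟩

-- transfer of A's equality tests to (stem, ext) form
theorem split_eq {s e o t : List Char} (he : '.' ∉ e) (ht : '.' ∉ t) :
    s ++ '.' :: e = o ++ '.' :: t ↔ s = o ∧ e = t :=
  ⟨fun h => dot_split_unique h he ht, fun ⟨h1, h2⟩ => by rw [h1, h2]⟩

-- ===== VERDICT (by name: the statement is the Claim_ definition above) =====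
theorem renamed_filename_spec : Claim_equal_renamed_filename := by
  intro name old_basename new_basename _
  unfold Spec_renamed_filename renamed_filename renamed_filename_alt renamedLoop
  rcases rpart_spec name.toList with ⟨hr, hm⟩ | ⟨s, e, hr, he, hm⟩
  · -- no dot in name: all of A's tests fail (every candidate contains '.'), B returns name
    have hne : ∀ t : List Char, '.' ∈ t → name.toList ≠ old_basename.toList ++ t := by
      intro t htm h
      exact hm (h ▸ (List.mem_append.mpr (Or.inr htm)))
    simp [hr, renamedLoop,
      hne ['.','x','w','b'] (by simp), hne ['.','x','s','b'] (by simp),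
      hne ['_','p','r','e','.','x','w','b'] (by simp), hne ['_','p','r','e','.','x','s','b'] (by simp),
      hne ['_','0','0','n','o','r','m','a','l','.','x','m','l'] (by simp),
      hne ['_','0','1','h','a','r','d','.','x','m','l'] (by simp),
      hne ['_','0','2','e','x','t','r','e','m','e','.','x','m','l'] (by simp),
      hne ['_','0','3','r','e','a','l','.','x','m','l'] (by simp)]
  · rw [hr]
    set o := old_basename.toList with ho
    set nb := new_basename.toList with hnb
    have A1 : (name.toList = o ++ ['.','x','w','b']) ↔ (s = o ∧ e = ['x','w','b']) := by
      rw [he]; exact split_eq hm (by decide)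
    have A2 : (name.toList = o ++ ['.','x','s','b']) ↔ (s = o ∧ e = ['x','s','b']) := by
      rw [he]; exact split_eq hm (by decide)
    have A3 : (name.toList = o ++ ['_','p','r','e','.','x','w','b']) ↔ (s = o ++ ['_','p','r','e'] ∧ e = ['x','w','b']) := by
      rw [he, show (['_','p','r','e','.','x','w','b'] : List Char) = ['_','p','r','e'] ++ '.' :: ['x','w','b'] from rfl,
          ← List.append_assoc]
      exact split_eq hm (by decide)
    have A4 : (name.toList = o ++ ['_','p','r','e','.','x','s','b']) ↔ (s = o ++ ['_','p','r','e'] ∧ e = ['x','s','b']) := by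
      rw [he, show (['_','p','r','e','.','x','s','b'] : List Char) = ['_','p','r','e'] ++ '.' :: ['x','s','b'] from rfl,
          ← List.append_assoc]
      exact split_eq hm (by decide)
    have A5 : (name.toList = o ++ ['_','0','0','n','o','r','m','a','l','.','x','m','l']) ↔ (s = o ++ ['_','0','0','n','o','r','m','a','l'] ∧ e = ['x','m','l']) := by
      rw [he, show (['_','0','0','n','o','r','m','a','l','.','x','m','l'] : List Char) = ['_','0','0','n','o','r','m','a','l'] ++ '.' :: ['x','m','l'] from rfl,
          ← List.append_assoc]
      exact split_eq hm (by decide)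
    have A6 : (name.toList = o ++ ['_','0','1','h','a','r','d','.','x','m','l']) ↔ (s = o ++ ['_','0','1','h','a','r','d'] ∧ e = ['x','m','l']) := by
      rw [he, show (['_','0','1','h','a','r','d','.','x','m','l'] : List Char) = ['_','0','1','h','a','r','d'] ++ '.' :: ['x','m','l'] from rfl,
          ← List.append_assoc]
      exact split_eq hm (by decide)
    have A7 : (name.toList = o ++ ['_','0','2','e','x','t','r','e','m','e','.','x','m','l']) ↔ (s = o ++ ['_','0','2','e','x','t','r','e','m','e'] ∧ e = ['x','m','l']) := by
      rw [he, show (['_','0','2','e','x','t','r','e','m','e','.','x','m','l'] : List Char) = ['_','0','2','e','x','t','r','e','m','e'] ++ '.' :: ['x','m','l'] from rfl,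
          ← List.append_assoc]
      exact split_eq hm (by decide)
    have A8 : (name.toList = o ++ ['_','0','3','r','e','a','l','.','x','m','l']) ↔ (s = o ++ ['_','0','3','r','e','a','l'] ∧ e = ['x','m','l']) := by
      rw [he, show (['_','0','3','r','e','a','l','.','x','m','l'] : List Char) = ['_','0','3','r','e','a','l'] ++ '.' :: ['x','m','l'] from rfl,
          ← List.append_assoc]
      exact split_eq hm (by decide)
    by_cases he1 : e = ['x','w','b']
    · subst he1
      by_cases hs1 : s = o
      · simp [renamedLoop, A1, hs1]
      · by_cases hs2 : s = o ++ ['_','p','r','e']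
        · simp [renamedLoop, A1, A2, A3, A4, hs1, hs2]
        · simp [renamedLoop, A1, A2, A3, A4, A5, A6, A7, A8, hs1, hs2]
    · by_cases he2 : e = ['x','s','b']
      · subst he2
        by_cases hs1 : s = o
        · simp [renamedLoop, A1, A2, hs1]
        · by_cases hs2 : s = o ++ ['_','p','r','e']
          · simp [renamedLoop, A1, A2, A3, A4, hs1, hs2]
          · simp [renamedLoop, A1, A2, A3, A4, A5, A6, A7, A8, hs1, hs2]
      · by_cases he3 : e = ['x','m','l']
        · subst he3
          have hsw : ∀ t : List Char, PySem.Chars.startswith (o ++ t) o = true := by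
            intro t
            rw [PySem.Chars.startswith_iff]
            exact ⟨t, rfl⟩
          by_cases h5 : s = o ++ ['_','0','0','n','o','r','m','a','l']
          · simp [renamedLoop, A1, A2, A3, A4, A5, he1, he2, h5, hsw, List.drop_left]
          · by_cases h6 : s = o ++ ['_','0','1','h','a','r','d']
            · simp [renamedLoop, A1, A2, A3, A4, A5, A6, he1, he2, h5, h6, hsw, List.drop_left]
            · by_cases h7 : s = o ++ ['_','0','2','e','x','t','r','e','m','e']
              · simp [renamedLoop, A1, A2, A3, A4, A5, A6, A7, he1, he2, h5, h6, h7, hsw, List.drop_left]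
              · by_cases h8 : s = o ++ ['_','0','3','r','e','a','l']
                · simp [renamedLoop, A1, A2, A3, A4, A5, A6, A7, A8, he1, he2, h5, h6, h7, h8, hsw, List.drop_left]
                · simp [renamedLoop, A1, A2, A3, A4, A5, A6, A7, A8, he1, he2, h5, h6, h7, h8]
                  intro hsw' hmem
                  rw [PySem.Chars.startswith_iff] at hsw'
                  obtain ⟨t, ht⟩ := hsw'
                  have hdrop : List.drop o.length s = t := by rw [← ht]; simp
                  have hs : s = o ++ List.drop o.length s := by rw [hdrop]; exact ht.symm
                  rcases hmem with h | h | h | h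
                  · exact absurd (hs.trans (by rw [h])) h5
                  · exact absurd (hs.trans (by rw [h])) h6
                  · exact absurd (hs.trans (by rw [h])) h7
                  · exact absurd (hs.trans (by rw [h])) h8
        · simp [renamedLoop, A1, A2, A3, A4, A5, A6, A7, A8, he1, he2, he3]
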